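-- pv_equiv track=rewrite | github.com/aliksey/projecteuler | problems/problem_075.py | factors_to_powers
-- ===== SOURCE A (Python) =====
-- def factors_to_powers(factors):
--     bases = [factors[0]]
--     powers = [1]
--     for i in range(1, len(factors)):
--         p = factors[i]
--         if p != factors[i-1]:
--             powers.append(1)
--             bases.append(factors[i])
--         else:
--             powers[-1] += 1
--     return bases, powers
-- ===== SOURCE B (Python) =====
-- def factors_to_powers(factors):
--     # Run-length encode by consuming whole runs of equal values.
--     bases, powers = [], []
--     i, n = 0, len(factors)
--     while i < n:
--         v = factors[i]
--         j = i
--         while j < n and factors[j] == v: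
--             j += 1
--         bases.append(v)
--         powers.append(j - i)
--         i = j
--     return bases, powers
-- ===== Notes on version B (the rewrite author's own statement) =====
-- stated objective: alternative
-- what changed: B run-length encodes by consuming whole runs of equal values (an outer loop advancing by run length, an inner scan finding each run's end), instead of A's single index loop comparing each element with its predecessor and mutating the last power in place.
import Mathlib
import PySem

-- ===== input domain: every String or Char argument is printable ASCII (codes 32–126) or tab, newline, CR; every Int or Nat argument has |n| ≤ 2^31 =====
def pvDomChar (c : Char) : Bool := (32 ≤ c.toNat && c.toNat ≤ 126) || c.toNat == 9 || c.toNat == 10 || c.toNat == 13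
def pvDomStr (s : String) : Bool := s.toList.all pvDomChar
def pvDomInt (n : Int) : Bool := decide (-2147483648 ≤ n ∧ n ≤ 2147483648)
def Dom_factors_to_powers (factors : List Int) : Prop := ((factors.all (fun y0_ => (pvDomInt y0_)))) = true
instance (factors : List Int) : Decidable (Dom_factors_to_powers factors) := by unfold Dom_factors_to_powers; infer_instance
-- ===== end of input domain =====

-- B run-length encodes by consuming whole runs (outer loop advancing by run length); A compares
-- each element with its predecessor and mutates the last power. Return values proved equal on
-- nonempty lists (Pre_); on the empty list A raises IndexError, so it lies outside the claim.

-- ===== PORT A =====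
-- powers[-1] += 1 : increment the last element of a (nonempty) list
def incLast : List Int → List Int
  | [] => []
  | [a] => [a + 1]
  | a :: r => a :: incLast r

-- one iteration of A's for-loop body (i ranges over range(1, len(factors)))
def stepA (factors : List Int) (bp : List Int × List Int) (i : Int) : List Int × List Int :=
  let p := (PySem.List.pyGet? factors i).getD 0          -- in range for every i of the loop
  if p ≠ (PySem.List.pyGet? factors (i - 1)).getD 0 then (bp.1 ++ [p], bp.2 ++ [1])
  else (bp.1, incLast bp.2)

-- the first subscript raises IndexError on the empty list: Pre_ excludes it, so .getD 0 is never taken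
def factors_to_powers (factors : List Int) : List Int × List Int :=
  (PySem.List.pyRange 1 factors.length 1).foldl (stepA factors)
    ([(PySem.List.pyGet? factors 0).getD 0], [(1 : Int)])

-- ===== PORT B =====
-- B's inner while: count the leading run of v, return (run length, rest)
def takeRun (v : Int) : List Int → Nat × List Int
  | [] => (0, [])
  | y :: ys => if y = v then
      let (n, r) := takeRun v ys
      (n + 1, r)
    else (0, y :: ys)

theorem takeRun_len_le (v : Int) (xs : List Int) : (takeRun v xs).2.length ≤ xs.length := by
  induction xs with
  | nil => simp [takeRun]
  | cons y ys ih =>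
    rcases h : takeRun v ys with ⟨n, r⟩
    have hr : r.length ≤ ys.length := by have := ih; rw [h] at this; exact this
    by_cases hy : y = v
    · simp only [takeRun, if_pos hy, h]
      exact Nat.le_succ_of_le hr
    · simp [takeRun, hy]

-- B's outer while: emit one (base, power) per run
def groupRuns : List Int → List Int × List Int
  | [] => ([], [])
  | x :: xs =>
    let nr := takeRun x xs          -- (run length, rest)
    let bp := groupRuns nr.2
    (x :: bp.1, ((nr.1 : Int) + 1) :: bp.2)
termination_by l => l.length
decreasing_by
  simp only [List.length_cons]
  exact Nat.lt_succ_of_le (takeRun_len_le x xs)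

def factors_to_powers_alt (factors : List Int) : List Int × List Int :=
  groupRuns factors

-- ===== PRECONDITION & SPEC =====
-- A subscripts the first element unconditionally, so it raises IndexError exactly on the empty list.
def Pre_factors_to_powers (factors : List Int) : Prop := factors ≠ []
instance (factors : List Int) : Decidable (Pre_factors_to_powers factors) := by
  unfold Pre_factors_to_powers; infer_instance

def pvWitness_factors_to_powers : List Int := [2, 2, 3]

def Spec_factors_to_powers (factors : List Int) (out : List Int × List Int) : Prop :=
  out = factors_to_powers_alt factors
instance (factors : List Int) (out : List Int × List Int) :
    Decidable (Spec_factors_to_powers factors out) := by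
  unfold Spec_factors_to_powers; infer_instance

-- ===== CLAIM (what is proved, stated in full; the proofs are below) =====
def Claim_equal_factors_to_powers : Prop := ∀ (factors : List Int),
  Dom_factors_to_powers factors → Pre_factors_to_powers factors →
    Spec_factors_to_powers factors (factors_to_powers factors)

-- ===== LEMMAS AND PROOFS =====

-- A's loop, rephrased over the list values: walk carries the previous element
def walk : Int → List Int → List Int × List Int → List Int × List Int
  | _, [], bp => bp
  | prev, p :: rest, bp =>
    walk p rest (if p ≠ prev then (bp.1 ++ [p], bp.2 ++ [1]) else (bp.1, incLast bp.2))

-- takeRun decomposes its input into the run and the rest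
theorem takeRun_spec (v : Int) (xs : List Int) :
    xs = List.replicate (takeRun v xs).1 v ++ (takeRun v xs).2 := by
  induction xs generalizing v with
  | nil => simp [takeRun]
  | cons y ys ih =>
    by_cases hy : y = v
    · subst hy
      simp only [takeRun, if_pos rfl]
      conv_lhs => rw [ih y]
      simp [List.replicate_succ]
    · simp [takeRun, hy]

theorem takeRun_rest_head (v : Int) (xs : List Int) (y : Int) (ys : List Int)
    (h : (takeRun v xs).2 = y :: ys) : y ≠ v := by
  induction xs generalizing v with
  | nil => simp [takeRun] at h
  | cons z zs ih =>
    by_cases hz : z = v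
    · subst hz
      simp only [takeRun, if_pos rfl] at h
      exact ih _ h
    · simp only [takeRun, if_neg hz] at h
      cases h
      exact hz

theorem getLast?_cons_replicate (n : Nat) (v : Int) :
    (v :: List.replicate n v).getLast? = some v := by
  induction n with
  | zero => rfl
  | succ m ih => rw [List.replicate_succ, List.getLast?_cons, List.getLast?_cons] at *; exact ih

theorem takeRun_nil_last (v : Int) (xs : List Int) (h : (takeRun v xs).2 = []) :
    (v :: xs).getLast? = some v := by
  conv_lhs => rw [takeRun_spec v xs, h]
  simp only [List.append_nil]
  exact getLast?_cons_replicate _ v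

theorem takeRun_cons_last (v : Int) (xs : List Int) (y : Int) (ys : List Int)
    (h : (takeRun v xs).2 = y :: ys) :
    (v :: xs).getLast? = (y :: ys).getLast? := by
  conv_lhs => rw [takeRun_spec v xs, h]
  rw [show v :: (List.replicate (takeRun v xs).1 v ++ y :: ys)
        = (v :: List.replicate (takeRun v xs).1 v) ++ y :: ys from rfl,
    List.getLast?_append_of_ne_nil]
  simp

theorem groupRuns_cons (x : Int) (xs : List Int) :
    groupRuns (x :: xs) =
      (x :: (groupRuns (takeRun x xs).2).1,
       (((takeRun x xs).1 : Int) + 1) :: (groupRuns (takeRun x xs).2).2) := by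
  simp [groupRuns]

-- key snoc lemma: appending one element updates the last run or starts a new one
theorem groupRuns_snoc (x : Int) (xs : List Int) (p : Int) :
    groupRuns (x :: (xs ++ [p])) =
      if some p ≠ (x :: xs).getLast? then
        ((groupRuns (x :: xs)).1 ++ [p], (groupRuns (x :: xs)).2 ++ [1])
      else ((groupRuns (x :: xs)).1, incLast (groupRuns (x :: xs)).2) := by
  induction hn : xs.length using Nat.strong_induction_on generalizing x xs with
  | _ n ih =>
  rcases hr : takeRun x xs with ⟨m, rest⟩
  cases rest with
  | nil =>
    -- xs is all x's; the last element of x :: xs is x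
    have hxs : xs = List.replicate m x := by
      have := takeRun_spec x xs; rw [hr] at this; simpa using this
    have hlast : (x :: xs).getLast? = some x := takeRun_nil_last x xs (by rw [hr])
    by_cases hp : p = x
    · subst hp
      have h1 : takeRun p (xs ++ [p]) = (m + 1, []) := by
        subst hxs
        clear hr hlast ih hn
        induction m with
        | zero => simp [takeRun]
        | succ k ihm => simp [List.replicate_succ, takeRun, ihm]
      rw [groupRuns_cons p (xs ++ [p]), h1, groupRuns_cons p xs, hr, hlast]
      simp [groupRuns, takeRun, incLast]
    · have h1 : takeRun x (xs ++ [p]) = (m, [p]) := by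
        subst hxs
        clear hr hlast ih hn
        induction m with
        | zero => simp [takeRun, hp]
        | succ k ihm => simp [List.replicate_succ, takeRun, ihm]
      rw [groupRuns_cons x (xs ++ [p]), h1, groupRuns_cons x xs, hr, hlast]
      simp [groupRuns, takeRun, hp, Ne.symm hp]
  | cons y ys =>
    have hy : y ≠ x := takeRun_rest_head x xs y ys (by rw [hr])
    have hdec : xs = List.replicate m x ++ y :: ys := by
      have := takeRun_spec x xs; rw [hr] at this; simpa using this
    have h1 : takeRun x (xs ++ [p]) = (m, y :: (ys ++ [p])) := by
      subst hdec
      clear hr ih hn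
      induction m with
      | zero => simp [takeRun, hy]
      | succ k ihm => simp_all [List.replicate_succ, takeRun]
    have hlast : (x :: xs).getLast? = (y :: ys).getLast? := takeRun_cons_last x xs y ys (by rw [hr])
    have hlen : ys.length < n := by
      subst hn hdec; simp; omega
    have ihy := ih ys.length hlen y ys rfl
    rw [groupRuns_cons x (xs ++ [p]), h1, groupRuns_cons x xs, hr, ihy, hlast]
    by_cases hc : some p ≠ (y :: ys).getLast?
    · simp [hc]
    · simp only [hc, if_neg hc]
      rw [groupRuns_cons y ys]
      cases h2 : (groupRuns (takeRun y ys).2).2 <;> simp [incLast, h2]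

-- walk extends groupRuns run by run
theorem walk_inv (rest : List Int) : ∀ (x v : Int) (xs : List Int),
    (x :: xs).getLast? = some v →
    walk v rest (groupRuns (x :: xs)) = groupRuns (x :: (xs ++ rest)) := by
  induction rest with
  | nil => intro x v xs _; simp [walk]
  | cons p rest' ih =>
    intro x v xs hlast
    have hstep : walk v (p :: rest') (groupRuns (x :: xs)) =
        walk p rest' (groupRuns (x :: (xs ++ [p]))) := by
      rw [walk, groupRuns_snoc]
      rw [hlast]
      by_cases hp : p = v
      · simp [hp]
      · simp [hp, Ne.symm hp]
    rw [hstep, ih x p (xs ++ [p]) (by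
      rw [show x :: (xs ++ [p]) = (x :: xs) ++ [p] from rfl]
      exact List.getLast?_concat)]
    simp


-- A's foldl over range(k, len) equals walk from position k
theorem foldl_eq_walk (l : List Int) : ∀ (n k : Nat) (bp : List Int × List Int),
    l.length - k = n → 1 ≤ k → k ≤ l.length →
    (PySem.List.pyRange k l.length 1).foldl (stepA l) bp
      = walk (l.getD (k - 1) 0) (l.drop k) bp := by
  intro n
  induction n with
  | zero =>
    intro k bp hn h1 h2
    have hk : k = l.length := by omega
    subst hk
    simp [PySem.List.pyRange_zero_nat, walk, List.drop_length]
  | succ n ihn =>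
    intro k bp hn h1 h2
    have hk : k < l.length := by omega
    rw [show ((k : Int)) = ((k : Nat) : Int) from rfl] at *
    rw [PySem.List.pyRange_one_cons (by exact_mod_cast hk)]
    rw [List.foldl_cons]
    have hstep : stepA l bp (k : Int) =
        (if l[k] ≠ l.getD (k - 1) 0 then (bp.1 ++ [l[k]], bp.2 ++ [1])
         else (bp.1, incLast bp.2)) := by
      have hp : PySem.List.pyGet? l (k : Int) = some l[k] := PySem.List.pyGet?_ofNat l k hk
      have hprev : ((k : Int) - 1) = ((k - 1 : Nat) : Int) := by omega
      have hprev2 : (PySem.List.pyGet? l ((k : Int) - 1)).getD 0 = l.getD (k - 1) 0 := by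
        rw [hprev, PySem.List.pyGet?_natCast]
        cases hx : l[k-1]? with
        | none => exfalso; rw [List.getElem?_eq_none_iff] at hx; omega
        | some a => simp [List.getD, hx]
      simp [stepA, hp, hprev2]
    rw [hstep]
    have hdrop : l.drop k = l[k] :: l.drop (k + 1) := List.drop_eq_getElem_cons hk
    rw [hdrop, walk]
    rw [show ((k : Int) + 1) = (((k + 1 : Nat)) : Int) by push_cast; ring]
    rw [ihn (k + 1)
      (if l[k] ≠ l.getD (k - 1) 0 then (bp.1 ++ [l[k]], bp.2 ++ [1]) else (bp.1, incLast bp.2))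
      (by omega) (by omega) (by omega)]
    have : l.getD (k + 1 - 1) 0 = l[k] := by
      simp [List.getD, List.getElem?_eq_getElem hk]
    rw [this]

theorem factors_to_powers_spec : Claim_equal_factors_to_powers := by
  intro factors _ hpre
  unfold Spec_factors_to_powers factors_to_powers factors_to_powers_alt
  cases factors with
  | nil => exact absurd rfl hpre
  | cons x xs =>
    have h0 : (PySem.List.pyGet? (x :: xs) 0).getD 0 = x := by
      simp [PySem.List.pyGet?_zero_cons]
    rw [h0]
    have hlen : 1 ≤ (x :: xs).length := by simp
    have hfw := foldl_eq_walk (x :: xs) ((x :: xs).length - 1) 1 ([x], [(1 : Int)]) rfl le_rfl hlen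
    simp only [Nat.cast_one] at hfw
    rw [hfw]
    have hgd : (x :: xs).getD 0 0 = x := rfl
    have hdrop : (x :: xs).drop 1 = xs := rfl
    rw [hgd, hdrop]
    have hinit : (([x], [(1 : Int)]) : List Int × List Int) = groupRuns [x] := by
      simp [groupRuns, takeRun]
    rw [hinit]
    have := walk_inv xs x x [] (by simp)
    simpa using this
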